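-- pv_equiv track=rewrite | github.com/Aimar1109/FUNDAMENTOS-DE-LA-PROGRAMACION | grafos/TP2/buscador.py | elegir_rutas
-- ===== SOURCE A (Python) =====
-- def elegir_rutas(rutas):
--     # Funcion para elegir la ruta con menos tiempo y la que menos escalas tenga
--     ruta_menos_escalas_tiempo = rutas[0]
--     ruta_menos_tiempo = rutas[0]
--     ruta_barata = rutas[0]
--     for ruta in rutas:
--         if len(ruta_menos_escalas_tiempo[0]) > len(ruta[0]):
--             ruta_menos_escalas_tiempo = ruta
--         elif len(ruta_menos_escalas_tiempo[0]) == len(ruta[0]) and ruta_menos_escalas_tiempo[1] > ruta[1]: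
--             ruta_menos_escalas_tiempo = ruta
--         if ruta_menos_tiempo[1] > ruta[1]:
--             ruta_menos_tiempo = ruta
--         if ruta_barata[-1] > ruta[-1]:
--             ruta_barata = ruta
--
--     return ruta_menos_escalas_tiempo, ruta_menos_tiempo, ruta_barata
-- ===== SOURCE B (Python) =====
-- def elegir_rutas(rutas):
--     # Sort-then-pick: stably sort the routes by each criterion and take the head of
--     # each sorted list; stable sorting preserves A's first-occurrence tie-breaking.
--     ruta_menos_escalas_tiempo = sorted(rutas, key=lambda r: (len(r[0]), r[1]))[0]
--     ruta_menos_tiempo = sorted(rutas, key=lambda r: r[1])[0]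
--     ruta_barata = sorted(rutas, key=lambda r: r[-1])[0]
--     return ruta_menos_escalas_tiempo, ruta_menos_tiempo, ruta_barata
-- ===== Notes on version B (the rewrite author's own statement) =====
-- stated objective: alternative
-- what changed: The single fused loop maintaining three running bests is replaced by sort-then-pick: three stable sorts (by the (len,time) tuple, by time, by price) whose heads are the answers; stability makes each head the first-occurring minimum, matching A's tie-breaking.
import Mathlib
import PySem

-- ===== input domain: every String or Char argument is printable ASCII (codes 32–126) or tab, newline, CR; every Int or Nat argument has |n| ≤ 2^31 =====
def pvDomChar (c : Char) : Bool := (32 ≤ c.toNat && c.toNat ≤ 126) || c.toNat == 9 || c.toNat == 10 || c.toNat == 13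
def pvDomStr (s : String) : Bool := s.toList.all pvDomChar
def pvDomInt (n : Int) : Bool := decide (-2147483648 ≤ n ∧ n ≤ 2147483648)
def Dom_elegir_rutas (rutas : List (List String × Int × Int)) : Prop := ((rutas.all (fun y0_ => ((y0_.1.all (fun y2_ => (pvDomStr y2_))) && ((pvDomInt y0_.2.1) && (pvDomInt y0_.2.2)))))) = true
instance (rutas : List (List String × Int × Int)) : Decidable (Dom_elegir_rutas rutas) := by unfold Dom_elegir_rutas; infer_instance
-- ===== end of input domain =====

-- B replaces A's single fused running-best loop by sort-then-pick: three stable sorts whose heads are the answers (alternative decomposition; not faster).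

-- ===== PORT A =====
-- the loop body: updates the three running bests exactly as A's three if-chains do
def pvStepA (s : (List String × Int × Int) × (List String × Int × Int) × (List String × Int × Int))
    (ruta : List String × Int × Int) :
    (List String × Int × Int) × (List String × Int × Int) × (List String × Int × Int) :=
  let e := if (s.1.1.length : Int) > (ruta.1.length : Int) then ruta
           else if (s.1.1.length : Int) = (ruta.1.length : Int) ∧ s.1.2.1 > ruta.2.1 then ruta
           else s.1
  let t := if s.2.1.2.1 > ruta.2.1 then ruta else s.2.1
  -- ruta[-1] on a length-3 tuple is its last component (the price): exact
  let b := if s.2.2.2.2 > ruta.2.2 then ruta else s.2.2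
  (e, t, b)

def elegir_rutas (rutas : List (List String × Int × Int)) :
    (List String × Int × Int) × (List String × Int × Int) × (List String × Int × Int) :=
  match PySem.List.pyGet? rutas 0 with
  | none => (([], 0, 0), ([], 0, 0), ([], 0, 0))   -- rutas[0] raises IndexError on []: excluded by Pre_
  | some h => rutas.foldl pvStepA (h, h, h)

-- ===== PORT B =====
def elegir_rutas_alt (rutas : List (List String × Int × Int)) :
    (List String × Int × Int) × (List String × Int × Int) × (List String × Int × Int) :=
  match PySem.List.pyGet? (PySem.List.sorted2 rutas (fun r => (r.1.length : Int)) (fun r => r.2.1)) 0,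
        PySem.List.pyGet? (PySem.List.sorted rutas (fun r => r.2.1)) 0,
        PySem.List.pyGet? (PySem.List.sorted rutas (fun r => r.2.2)) 0 with
  | some e, some t, some b => (e, t, b)
  | _, _, _ => (([], 0, 0), ([], 0, 0), ([], 0, 0))   -- sorted([])[0] raises IndexError on []: excluded by Pre_

-- ===== PRECONDITION & SPEC =====
-- Both A (rutas[0]) and B (sorted(rutas)[0]) raise IndexError on the empty list; Pre_ excludes exactly that input.
def Pre_elegir_rutas (rutas : List (List String × Int × Int)) : Prop := rutas ≠ []
instance (rutas : List (List String × Int × Int)) : Decidable (Pre_elegir_rutas rutas) := by unfold Pre_elegir_rutas; infer_instance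

def pvWitness_elegir_rutas : (List (List String × Int × Int)) := [(["EZE", "MAD"], 13, 950)]

def Spec_elegir_rutas (rutas : List (List String × Int × Int)) (out : (List String × Int × Int) × (List String × Int × Int) × (List String × Int × Int)) : Prop := out = elegir_rutas_alt rutas
instance (rutas : List (List String × Int × Int)) (out : (List String × Int × Int) × (List String × Int × Int) × (List String × Int × Int)) : Decidable (Spec_elegir_rutas rutas out) := by unfold Spec_elegir_rutas; infer_instance

-- ===== CLAIM (what is proved, stated in full; the proofs are below) =====
def Claim_equal_elegir_rutas : Prop := ∀ (rutas : List (List String × Int × Int)), Dom_elegir_rutas rutas → Pre_elegir_rutas rutas → Spec_elegir_rutas rutas (elegir_rutas rutas)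

-- ===== LEMMAS AND PROOFS =====

-- the three one-component update steps A's fused step decomposes into
def pvStepE (m r : List String × Int × Int) : List String × Int × Int :=
  if (m.1.length : Int) > (r.1.length : Int) then r
  else if (m.1.length : Int) = (r.1.length : Int) ∧ m.2.1 > r.2.1 then r else m
def pvStepT (m r : List String × Int × Int) : List String × Int × Int :=
  if m.2.1 > r.2.1 then r else m
def pvStepB (m r : List String × Int × Int) : List String × Int × Int :=
  if m.2.2 > r.2.2 then r else m

lemma pvStepA_eq (s : (List String × Int × Int) × (List String × Int × Int) × (List String × Int × Int))
    (r : List String × Int × Int) :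
    pvStepA s r = (pvStepE s.1 r, pvStepT s.2.1 r, pvStepB s.2.2 r) := rfl

lemma pv_fold_split (t : List (List String × Int × Int))
    (a b c : List String × Int × Int) :
    t.foldl pvStepA (a, b, c) = (t.foldl pvStepE a, t.foldl pvStepT b, t.foldl pvStepB c) := by
  induction t generalizing a b c with
  | nil => rfl
  | cons x xs ih => simp only [List.foldl_cons, pvStepA_eq]; exact ih _ _ _

lemma pvStepA_self (h : List String × Int × Int) : pvStepA (h, h, h) h = (h, h, h) := by
  simp [pvStepA]

lemma pv_pyGet_zero {α : Type} (l : List α) : PySem.List.pyGet? l 0 = l.head? := by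
  cases l <;> simp [PySem.List.pyGet?, PySem.List.pyIdx?]

-- the head of an insertion-sort fold is the first-occurring minimum under `before`
lemma pv_head_foldl_insertBy {α : Type} (before : α → α → Bool) (t : List α)
    (y : α) (ys : List α) :
    ((t.foldl (fun acc x => PySem.List.insertBy before x acc) (y :: ys))).head? =
      some (t.foldl (fun m x => if before x m then x else m) y) := by
  induction t generalizing y ys with
  | nil => rfl
  | cons x xs ih =>
    have hstep : PySem.List.insertBy before x (y :: ys)
        = if before x y then x :: y :: ys else y :: PySem.List.insertBy before x ys := rfl
    simp only [List.foldl_cons, hstep]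
    by_cases h : before x y
    · rw [if_pos h, ih x (y :: ys)]
      simp [h]
    · rw [if_neg h]
      cases hins : PySem.List.insertBy before x ys with
      | nil => rw [ih y []]; simp [h]
      | cons z zs => rw [ih y (z :: zs)]; simp [h]


-- the comparison predicates Python's key functions induce (as in PySem.List.sorted/sorted2)
def pvLtE (a b : List String × Int × Int) : Bool :=
  decide ((a.1.length : Int) < (b.1.length : Int)) ||
    (!decide ((b.1.length : Int) < (a.1.length : Int)) && decide (a.2.1 < b.2.1))
def pvLtT (a b : List String × Int × Int) : Bool := decide (a.2.1 < b.2.1)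
def pvLtS (a b : List String × Int × Int) : Bool := decide (a.2.2 < b.2.2)

lemma pv_stepE_eq : (fun (m x : List String × Int × Int) => if pvLtE x m then x else m) = pvStepE := by
  funext m x
  simp only [pvLtE, pvStepE, gt_iff_lt, Bool.or_eq_true, Bool.and_eq_true, Bool.not_eq_true',
    decide_eq_true_eq, decide_eq_false_iff_not]
  split_ifs <;> first | rfl | (exfalso; omega)

lemma pv_stepT_eq : (fun (m x : List String × Int × Int) => if pvLtT x m then x else m) = pvStepT := by
  funext m x
  simp only [pvLtT, pvStepT, gt_iff_lt, decide_eq_true_eq]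

lemma pv_stepS_eq : (fun (m x : List String × Int × Int) => if pvLtS x m then x else m) = pvStepB := by
  funext m x
  simp only [pvLtS, pvStepB, gt_iff_lt, decide_eq_true_eq]

lemma pv_head_sorted2_cons (t : List (List String × Int × Int)) (h : List String × Int × Int) :
    (PySem.List.sorted2 (h :: t) (fun r => (r.1.length : Int)) (fun r => r.2.1)).head? =
      some (t.foldl pvStepE h) := by
  have h1 : PySem.List.sorted2 (h :: t) (fun r => (r.1.length : Int)) (fun r => r.2.1)
      = t.foldl (fun acc x => PySem.List.insertBy pvLtE x acc) [h] := rfl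
  rw [h1, pv_head_foldl_insertBy, pv_stepE_eq]

lemma pv_head_sortedT_cons (t : List (List String × Int × Int)) (h : List String × Int × Int) :
    (PySem.List.sorted (h :: t) (fun r => r.2.1)).head? = some (t.foldl pvStepT h) := by
  have h1 : PySem.List.sorted (h :: t) (fun r => r.2.1)
      = t.foldl (fun acc x => PySem.List.insertBy pvLtT x acc) [h] := rfl
  rw [h1, pv_head_foldl_insertBy, pv_stepT_eq]

lemma pv_head_sortedS_cons (t : List (List String × Int × Int)) (h : List String × Int × Int) :
    (PySem.List.sorted (h :: t) (fun r => r.2.2)).head? = some (t.foldl pvStepB h) := by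
  have h1 : PySem.List.sorted (h :: t) (fun r => r.2.2)
      = t.foldl (fun acc x => PySem.List.insertBy pvLtS x acc) [h] := rfl
  rw [h1, pv_head_foldl_insertBy, pv_stepS_eq]

-- ===== VERDICT (by name: the statement is the Claim_ definition above) =====
theorem elegir_rutas_spec : Claim_equal_elegir_rutas := by
  intro rutas _ hpre
  unfold Spec_elegir_rutas
  cases rutas with
  | nil => exact absurd rfl hpre
  | cons h t =>
    have hget : PySem.List.pyGet? (h :: t) 0 = some h := by
      simp [PySem.List.pyGet?, PySem.List.pyIdx?]
    have hA : elegir_rutas (h :: t)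
        = (t.foldl pvStepE h, t.foldl pvStepT h, t.foldl pvStepB h) := by
      simp only [elegir_rutas, hget]
      rw [List.foldl_cons, pvStepA_self, pv_fold_split]
    have hE := pv_head_sorted2_cons t h
    have hT := pv_head_sortedT_cons t h
    have hS := pv_head_sortedS_cons t h
    rw [hA]
    simp only [elegir_rutas_alt, pv_pyGet_zero, hE, hT, hS]
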